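-- pv_equiv track=rewrite | github.com/jkozdroj/PythonLab | lab02/multiprocess.py | _pairwise_merge
-- ===== SOURCE A (Python) =====
-- def _merge(left, right):
--     i = j = 0
--     out = []
--     len_l, len_r = len(left), len(right)
--     while i < len_l and j < len_r:
--         if left[i] <= right[j]:
--             out.append(left[i]); i += 1
--         else:
--             out.append(right[j]); j += 1
--     if i < len_l:
--         out.extend(left[i:])
--     if j < len_r:
--         out.extend(right[j:])
--     return out
--
-- def _pairwise_merge(runs):
--
--     while len(runs) > 1:
--         merged = []
--         it = iter(runs)
--         for a in it:
--             try:
--                 b = next(it)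
--             except StopIteration:
--                 merged.append(a)
--                 break
--             merged.append(_merge(a, b))
--         runs = merged
--     return runs[0] if runs else []
-- ===== SOURCE B (Python) =====
-- def _pairwise_merge(runs):
--     # k-way merge: repeatedly pop the smallest current front among all runs
--     # (earliest run wins ties), instead of rounds of balanced two-way merges.
--     tails = [r for r in runs if r]
--     out = []
--     while tails:
--         best, besth = 0, tails[0][0]
--         for k in range(1, len(tails)):
--             h = tails[k][0]
--             if h < besth:
--                 best, besth = k, h
--         out.append(besth)
--         rest = tails[best][1:]
--         if rest:
--             tails[best] = rest
--         else:
--             del tails[best]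
--     return out
-- ===== Notes on version B (the rewrite author's own statement) =====
-- stated objective: alternative
-- what changed: Replaces A's rounds of balanced pairwise two-way merges over a shrinking list of runs by a single k-way merge that repeatedly selects and pops the smallest current front among all runs (earliest run wins ties).
import Mathlib
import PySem

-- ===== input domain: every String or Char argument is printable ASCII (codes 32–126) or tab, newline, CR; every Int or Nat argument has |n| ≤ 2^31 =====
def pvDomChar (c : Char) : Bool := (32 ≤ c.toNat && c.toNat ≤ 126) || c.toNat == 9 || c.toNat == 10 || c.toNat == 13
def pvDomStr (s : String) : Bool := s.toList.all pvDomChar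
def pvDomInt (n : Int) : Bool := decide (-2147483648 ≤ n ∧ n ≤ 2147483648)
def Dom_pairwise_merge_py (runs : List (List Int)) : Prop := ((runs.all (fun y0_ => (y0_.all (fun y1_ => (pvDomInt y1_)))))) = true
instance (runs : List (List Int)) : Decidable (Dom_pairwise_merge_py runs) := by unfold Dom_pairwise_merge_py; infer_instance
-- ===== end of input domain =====

-- B replaces A's rounds of balanced pairwise two-way merges by a single k-way
-- selection merge (pop the smallest current front, earliest run on ties); same
-- return value on every input, proved below (objective: alternative algorithm).

-- ===== PORT A =====
-- _merge: the while loop walks suffixes of left/right (indices i,j become the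
-- suffixes left[i:], right[j:]), then extends with the leftover suffix.
def mergeA : List Int → List Int → List Int
  | [], r => r
  | l, [] => l
  | a :: l, b :: r => if a ≤ b then a :: mergeA l (b :: r) else b :: mergeA (a :: l) r

-- one pass of the outer while-loop body: pair up adjacent runs (odd leftover kept)
def pairRoundA : List (List Int) → List (List Int)
  | [] => []
  | [a] => [a]
  | a :: b :: rest => mergeA a b :: pairRoundA rest

lemma pairRoundA_length_lt (rs : List (List Int)) (h : 1 < rs.length) :
    (pairRoundA rs).length < rs.length := by
  match rs with
  | [] => simp at h
  | [a] => simp at h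
  | a :: b :: rest =>
    simp only [pairRoundA, List.length_cons]
    match rest with
    | [] => simp [pairRoundA]
    | [c] => simp [pairRoundA]
    | c :: d :: rest' =>
      have := pairRoundA_length_lt (c :: d :: rest') (by simp)
      simp only [List.length_cons] at *
      omega

-- while len(runs) > 1: runs = merged
def mergeLoopA (runs : List (List Int)) : List (List Int) :=
  if h : 1 < runs.length then mergeLoopA (pairRoundA runs) else runs
termination_by runs.length
decreasing_by exact pairRoundA_length_lt _ h

-- return runs[0] if runs else []
def pairwise_merge_py (runs : List (List Int)) : List Int :=
  (mergeLoopA runs).headD []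

-- ===== PORT B =====
-- the for-k loop: scan the remaining tails keeping (best, besth); `tails[k][0]`
-- is `headD 0` (exact here: the loop invariant keeps every tail nonempty).
def bestGo : List (List Int) → Nat → Nat × Int → Nat × Int
  | [], _, acc => acc
  | t :: ts, k, (best, besth) =>
      let h := t.headD 0
      bestGo ts (k + 1) (if h < besth then (k, h) else (best, besth))

lemma bestGo_fst_lt (ts : List (List Int)) (k b n : Nat) (bh : Int)
    (hb : b < n) (hk : k + ts.length ≤ n) : (bestGo ts k (b, bh)).1 < n := by
  induction ts generalizing k b bh with
  | nil => simpa [bestGo]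
  | cons t ts ih =>
    simp only [bestGo]
    split
    · exact ih (k + 1) k _ (by simp at hk; omega) (by simp at hk ⊢; omega)
    · exact ih (k + 1) b _ hb (by simp at hk ⊢; omega)

-- termination measure for the while loop: total number of pending elements plus run count
def wsum (tails : List (List Int)) : Nat := (tails.map List.length).sum + tails.length

lemma wsum_eraseIdx_lt (l : List (List Int)) (b : Nat) (hb : b < l.length) :
    wsum (l.eraseIdx b) < wsum l := by
  induction l generalizing b with
  | nil => simp at hb
  | cons x l ih =>
    cases b with
    | zero => simp [wsum]; omega
    | succ b =>
      have := ih b (by simpa using Nat.lt_of_succ_lt_succ hb)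
      simp only [wsum, List.eraseIdx_cons_succ, List.map_cons, List.sum_cons, List.length_cons] at *
      omega

lemma wsum_set_tail_lt (l : List (List Int)) (b : Nat) (hb : b < l.length)
    (hne : (l.getD b []) ≠ []) :
    wsum (l.set b (l.getD b []).tail) < wsum l := by
  induction l generalizing b with
  | nil => simp at hb
  | cons x l ih =>
    cases b with
    | zero =>
      simp only [List.getD_cons_zero] at hne ⊢
      simp only [wsum, List.set_cons_zero, List.map_cons, List.sum_cons, List.length_cons]
      have : x.tail.length < x.length := by
        cases x with
        | nil => exact absurd rfl hne
        | cons y ys => simp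
      omega
    | succ b =>
      have := ih b (by simpa using Nat.lt_of_succ_lt_succ hb) (by simpa using hne)
      simp only [wsum, List.getD_cons_succ, List.set_cons_succ, List.map_cons,
        List.sum_cons, List.length_cons] at *
      omega

-- while tails: select smallest front (earliest on ties), pop it, append it
def kloopB : List (List Int) → List Int
  | [] => []
  | t :: ts =>
    let bb := bestGo ts 1 (0, t.headD 0)
    let rest := ((t :: ts).getD bb.1 []).tail
    let tails' := if rest.isEmpty then (t :: ts).eraseIdx bb.1 else (t :: ts).set bb.1 rest
    bb.2 :: kloopB tails'
termination_by tails => wsum tails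
decreasing_by
  have hlt : (bestGo ts 1 (0, t.headD 0)).1 < (t :: ts).length :=
    bestGo_fst_lt ts 1 0 (t :: ts).length (t.headD 0) (by simp)
      (by simp only [List.length_cons]; omega)
  split
  · exact wsum_eraseIdx_lt _ _ hlt
  · rename_i hE
    apply wsum_set_tail_lt _ _ hlt
    intro hc
    rw [hc] at hE
    simp at hE

-- tails = [r for r in runs if r]; then the while loop
def pairwise_merge_py_alt (runs : List (List Int)) : List Int :=
  kloopB (runs.filter (fun r => !r.isEmpty))

-- ===== PRECONDITION & SPEC =====
def Spec_pairwise_merge_py (runs : List (List Int)) (out : List Int) : Prop := out = pairwise_merge_py_alt runs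
instance (runs : List (List Int)) (out : List Int) : Decidable (Spec_pairwise_merge_py runs out) := by unfold Spec_pairwise_merge_py; infer_instance

-- ===== CLAIM (what is proved, stated in full; the proofs are below) =====
def Claim_equal_pairwise_merge_py : Prop := ∀ (runs : List (List Int)), Dom_pairwise_merge_py runs → Spec_pairwise_merge_py runs (pairwise_merge_py runs)

-- ===== LEMMAS AND PROOFS =====

-- Both programs compute the same "front merge" of the whole run list; the pivot
-- characterisation is mergeAll, the right fold of the two-way front merge.
def mergeAll (rs : List (List Int)) : List Int := rs.foldr mergeA []

lemma mergeAll_cons (x : List Int) (rs : List (List Int)) :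
    mergeAll (x :: rs) = mergeA x (mergeAll rs) := rfl

lemma mergeA_nil_right (l : List Int) : mergeA l [] = l := by
  cases l <;> simp [mergeA]

lemma mergeA_assoc (a : List Int) : ∀ b c : List Int,
    mergeA (mergeA a b) c = mergeA a (mergeA b c) := by
  induction a with
  | nil => intro b c; simp [mergeA]
  | cons x as iha =>
    intro b
    induction b with
    | nil => intro c; simp [mergeA, mergeA_nil_right]
    | cons y bs ihb =>
      intro c
      induction c with
      | nil => simp [mergeA_nil_right]
      | cons z cs ihc =>
        by_cases hxy : x ≤ y <;> by_cases hyz : y ≤ z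
        · have hxz : x ≤ z := le_trans hxy hyz
          simp only [mergeA, if_pos hxy, if_pos hyz, if_pos hxz]
          rw [iha]
          simp [mergeA, if_pos hyz]
        · by_cases hxz : x ≤ z
          · simp only [mergeA, if_pos hxy, if_neg hyz, if_pos hxz]
            rw [iha]
            simp [mergeA, if_neg hyz]
          · simp only [mergeA, if_pos hxy, if_neg hyz, if_neg hxz]
            have := ihc
            simp only [mergeA, if_pos hxy] at this ⊢
            rw [this]
        · simp only [mergeA, if_neg hxy, if_pos hyz]
          rw [ihb]
        · have hxz : ¬ x ≤ z := by omega
          simp only [mergeA, if_neg hxy, if_neg hyz, if_neg hxz]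
          have h2 : mergeA (y :: mergeA (x :: as) bs) cs
              = mergeA (x :: as) (mergeA (y :: bs) cs) := by
            rw [show (y :: mergeA (x :: as) bs) = mergeA (x :: as) (y :: bs) from by
              simp [mergeA, if_neg hxy]]
            exact ihc
          rw [h2]

lemma mergeAll_pairRound (rs : List (List Int)) :
    mergeAll (pairRoundA rs) = mergeAll rs := by
  induction rs using pairRoundA.induct with
  | case1 => rfl
  | case2 a => rfl
  | case3 a b rest ih =>
    simp only [pairRoundA, mergeAll_cons, ih]
    exact mergeA_assoc a b (mergeAll rest)

lemma mergeLoopA_props (rs : List (List Int)) :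
    mergeAll (mergeLoopA rs) = mergeAll rs ∧ (mergeLoopA rs).length ≤ 1 := by
  induction rs using mergeLoopA.induct with
  | case1 rs h ih =>
    rw [mergeLoopA, dif_pos h]
    exact ⟨ih.1.trans (mergeAll_pairRound rs), ih.2⟩
  | case2 rs h =>
    rw [mergeLoopA, dif_neg h]
    exact ⟨rfl, by omega⟩

lemma pairwise_eq_mergeAll (runs : List (List Int)) :
    pairwise_merge_py runs = mergeAll runs := by
  obtain ⟨h1, h2⟩ := mergeLoopA_props runs
  rw [pairwise_merge_py]
  match hm : mergeLoopA runs with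
  | [] =>
    rw [hm] at h1
    simpa using h1.symm
  | [t] =>
    rw [hm] at h1
    simp only [mergeAll, List.foldr_cons, List.foldr_nil, mergeA_nil_right] at h1
    simp only [List.headD_cons, mergeAll]
    exact h1
  | a :: b :: l =>
    rw [hm] at h2
    simp at h2

lemma mergeAll_head (rs : List (List Int)) (h : ∀ q ∈ rs, q ≠ []) :
    mergeAll rs = [] ∨ ∃ q ∈ rs, ∃ m, mergeAll rs = q.headD 0 :: m := by
  induction rs with
  | nil => left; rfl
  | cons q rs ih =>
    have hq := h q (by simp)
    cases q with
    | nil => exact absurd rfl hq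
    | cons a q2 =>
      rcases ih (fun p hp => h p (by simp [hp])) with h0 | ⟨p, hp, m, hm⟩
      · right
        refine ⟨a :: q2, by simp, q2, ?_⟩
        rw [mergeAll_cons, h0, mergeA_nil_right]
        rfl
      · right
        rw [mergeAll_cons, hm]
        by_cases hc : a ≤ p.headD 0
        · refine ⟨a :: q2, by simp, mergeA q2 (p.headD 0 :: m), ?_⟩
          simp only [mergeA, List.headD_cons]
          rw [if_pos hc]
        · refine ⟨p, by simp [hp], mergeA (a :: q2) m, ?_⟩
          simp only [mergeA]
          rw [if_neg hc]

lemma mergeA_cons_mergeAll (x : Int) (t' : List Int) (rs : List (List Int))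
    (h1 : ∀ q ∈ rs, q ≠ []) (h2 : ∀ q ∈ rs, x ≤ q.headD 0) :
    mergeA (x :: t') (mergeAll rs) = x :: mergeA t' (mergeAll rs) := by
  rcases mergeAll_head rs h1 with h0 | ⟨p, hp, m, hm⟩
  · rw [h0, mergeA_nil_right, mergeA_nil_right]
  · rw [hm]
    have hx : x ≤ p.headD 0 := h2 p hp
    simp only [mergeA]
    rw [if_pos hx]

lemma mergeAll_pop (pre : List (List Int)) (x : Int) (t' : List Int) (suf : List (List Int))
    (hp1 : ∀ q ∈ pre, q ≠ []) (hp2 : ∀ q ∈ pre, x < q.headD 0)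
    (hs1 : ∀ q ∈ suf, q ≠ []) (hs2 : ∀ q ∈ suf, x ≤ q.headD 0) :
    mergeAll (pre ++ (x :: t') :: suf) = x :: mergeAll (pre ++ t' :: suf) := by
  induction pre with
  | nil =>
    simp only [List.nil_append, mergeAll_cons]
    exact mergeA_cons_mergeAll x t' suf hs1 hs2
  | cons p pre ih =>
    cases p with
    | nil => exact absurd rfl (hp1 [] (by simp))
    | cons a p2 =>
      simp only [List.cons_append, mergeAll_cons]
      rw [ih (fun q hq => hp1 q (by simp [hq])) (fun q hq => hp2 q (by simp [hq]))]
      have ha : ¬ a ≤ x := by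
        have := hp2 (a :: p2) (by simp)
        simp only [List.headD_cons] at this
        omega
      simp [mergeA, if_neg ha]

lemma mergeAll_nil_mid (pre suf : List (List Int)) :
    mergeAll (pre ++ [] :: suf) = mergeAll (pre ++ suf) := by
  induction pre with
  | nil => simp [mergeAll_cons, mergeA]
  | cons p pre ih => simp only [List.cons_append, mergeAll_cons, ih]

lemma bestGo_spec (ts : List (List Int)) : ∀ (k b : Nat) (bh : Int),
    (bestGo ts k (b, bh) = (b, bh) ∧ ∀ q ∈ ts, bh ≤ q.headD 0)
  ∨ (∃ p l s, ts = p ++ l :: s ∧ bestGo ts k (b, bh) = (k + p.length, l.headD 0)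
      ∧ l.headD 0 < bh ∧ (∀ q ∈ p, l.headD 0 < q.headD 0) ∧ (∀ q ∈ s, l.headD 0 ≤ q.headD 0)) := by
  induction ts with
  | nil => intro k b bh; left; exact ⟨rfl, by simp⟩
  | cons t ts ih =>
    intro k b bh
    by_cases hc : t.headD 0 < bh
    · rcases ih (k + 1) k (t.headD 0) with ⟨heq, hall⟩ | ⟨p, l, s, hts, heq, hlt, hp, hs⟩
      · right
        refine ⟨[], t, ts, rfl, ?_, hc, by simp, hall⟩
        simp only [bestGo]
        rw [if_pos hc, heq]
        simp
      · right
        refine ⟨t :: p, l, s, by simp [hts], ?_, lt_trans hlt hc, ?_, hs⟩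
        · simp only [bestGo, List.length_cons]
          rw [if_pos hc, heq]
          have harith : k + 1 + p.length = k + (p.length + 1) := by omega
          rw [harith]
        · intro q hq
          rcases List.mem_cons.mp hq with rfl | hq2
          · exact hlt
          · exact hp q hq2
    · rcases ih (k + 1) b bh with ⟨heq, hall⟩ | ⟨p, l, s, hts, heq, hlt, hp, hs⟩
      · left
        refine ⟨by simp only [bestGo]; rw [if_neg hc, heq], ?_⟩
        intro q hq
        rcases List.mem_cons.mp hq with rfl | hq2
        · omega
        · exact hall q hq2
      · right
        refine ⟨t :: p, l, s, by simp [hts], ?_, hlt, ?_, hs⟩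
        · simp only [bestGo, List.length_cons]
          rw [if_neg hc, heq]
          have harith : k + 1 + p.length = k + (p.length + 1) := by omega
          rw [harith]
        · intro q hq
          rcases List.mem_cons.mp hq with rfl | hq2
          · omega
          · exact hp q hq2

lemma getD_append_len (pre : List (List Int)) (l : List Int) (suf : List (List Int)) :
    (pre ++ l :: suf).getD pre.length [] = l := by
  induction pre with
  | nil => rfl
  | cons p pre ih => simpa using ih

lemma eraseIdx_append_len (pre : List (List Int)) (l : List Int) (suf : List (List Int)) :
    (pre ++ l :: suf).eraseIdx pre.length = pre ++ suf := by
  induction pre with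
  | nil => rfl
  | cons p pre ih => simpa using ih

lemma set_append_len (pre : List (List Int)) (l r : List Int) (suf : List (List Int)) :
    (pre ++ l :: suf).set pre.length r = pre ++ r :: suf := by
  induction pre with
  | nil => rfl
  | cons p pre ih => simpa using ih

lemma wsum_append (a b : List (List Int)) : wsum (a ++ b) = wsum a + wsum b := by
  simp only [wsum, List.map_append, List.sum_append, List.length_append]
  omega

lemma wsum_cons (x : List Int) (l : List (List Int)) :
    wsum (x :: l) = x.length + wsum l + 1 := by
  simp only [wsum, List.map_cons, List.sum_cons, List.length_cons]
  omega

lemma kloopB_eq_mergeAll : ∀ (n : Nat) (tails : List (List Int)), wsum tails ≤ n →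
    (∀ q ∈ tails, q ≠ []) → kloopB tails = mergeAll tails := by
  intro n
  induction n with
  | zero =>
    intro tails hw hne
    cases tails with
    | nil => rw [kloopB]; rfl
    | cons t ts => rw [wsum_cons] at hw; omega
  | succ n ih =>
    intro tails hw hne
    cases tails with
    | nil => rw [kloopB]; rfl
    | cons t ts =>
      have key : ∀ (pre : List (List Int)) (l : List Int) (suf : List (List Int)),
          t :: ts = pre ++ l :: suf →
          bestGo ts 1 (0, t.headD 0) = (pre.length, l.headD 0) →
          (∀ q ∈ pre, l.headD 0 < q.headD 0) →
          (∀ q ∈ suf, l.headD 0 ≤ q.headD 0) →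
          kloopB (t :: ts) = mergeAll (t :: ts) := by
        intro pre l suf hts hbb hp hs
        have hne2 : ∀ q ∈ pre ++ l :: suf, q ≠ [] := by rw [← hts]; exact hne
        have hlne : l ≠ [] := hne2 l (by simp)
        obtain ⟨lh, lt', rfl⟩ : ∃ a m, l = a :: m := by
          cases l with
          | nil => exact absurd rfl hlne
          | cons a m => exact ⟨a, m, rfl⟩
        simp only [List.headD_cons] at hp hs hbb
        have hp1 : ∀ q ∈ pre, q ≠ [] := fun q hq => hne2 q (by simp [hq])
        have hs1 : ∀ q ∈ suf, q ≠ [] := fun q hq => hne2 q (by simp [hq])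
        have hw2 : wsum (pre ++ (lh :: lt') :: suf) ≤ n + 1 := by rw [← hts]; exact hw
        rw [wsum_append, wsum_cons] at hw2
        rw [kloopB]
        simp only [hbb]
        rw [hts, getD_append_len]
        simp only [List.tail_cons]
        by_cases hrest : lt' = []
        · subst hrest
          simp only [List.isEmpty_nil, if_true]
          rw [eraseIdx_append_len]
          rw [ih (pre ++ suf)
            (by rw [wsum_append]; simp only [List.length_cons, List.length_nil] at hw2; omega)
            (by intro q hq
                rcases List.mem_append.mp hq with h1 | h1
                · exact hp1 q h1
                · exact hs1 q h1)]
          rw [mergeAll_pop pre lh [] suf hp1 hp hs1 hs, mergeAll_nil_mid]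
        · have hre : lt'.isEmpty = false := by
            cases lt' with
            | nil => exact absurd rfl hrest
            | cons u v => rfl
          rw [hre]
          simp only [Bool.false_eq_true, if_false]
          rw [set_append_len]
          rw [ih (pre ++ lt' :: suf)
            (by rw [wsum_append, wsum_cons]; simp only [List.length_cons] at hw2; omega)
            (by intro q hq
                rcases List.mem_append.mp hq with h1 | h1
                · exact hp1 q h1
                · rcases List.mem_cons.mp h1 with rfl | h2
                  · exact hrest
                  · exact hs1 q h2)]
          rw [mergeAll_pop pre lh lt' suf hp1 hp hs1 hs]
      rcases bestGo_spec ts 1 0 (t.headD 0) with ⟨heq, hall⟩ | ⟨p, l, s, hts, heq, hlt, hp, hs⟩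
      · exact key [] t ts rfl (by simpa using heq) (by simp) hall
      · refine key (t :: p) l s (by simp [hts]) ?_ ?_ hs
        · rw [heq]
          simp only [List.length_cons]
          have harith : 1 + p.length = p.length + 1 := by omega
          rw [harith]
        · intro q hq
          rcases List.mem_cons.mp hq with rfl | hq2
          · exact hlt
          · exact hp q hq2

lemma mergeAll_filter (runs : List (List Int)) :
    mergeAll (runs.filter (fun r => !r.isEmpty)) = mergeAll runs := by
  induction runs with
  | nil => rfl
  | cons r rs ih =>
    cases r with
    | nil => simpa [List.filter_cons, mergeAll_cons, mergeA] using ih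
    | cons a r2 => simp [mergeAll_cons, ih]

lemma main_eq (runs : List (List Int)) :
    pairwise_merge_py runs = pairwise_merge_py_alt runs := by
  rw [pairwise_eq_mergeAll, pairwise_merge_py_alt,
    kloopB_eq_mergeAll (wsum (runs.filter (fun r => !r.isEmpty))) _ le_rfl
      (by intro q hq; simp [List.mem_filter] at hq; simpa using hq.2),
    mergeAll_filter]

-- ===== VERDICT (by name: the statement is the Claim_ definition above) =====
theorem pairwise_merge_py_spec : Claim_equal_pairwise_merge_py := by
  intro runs _
  unfold Spec_pairwise_merge_py
  exact main_eq runs
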